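-- pv_equiv track=rewrite | github.com/Monarch33/black-edge | backend/engine/dependency_agent.py | _generate_independent_outcomes
-- ===== SOURCE A (Python) =====
-- def _generate_independent_outcomes(
--
--     m1_count: int,
--     m2_count: int,
-- ) -> list[list[int]]:
--     """Generate all valid outcomes for independent markets."""
--     outcomes = []
--     for i in range(m1_count):
--         for j in range(m2_count):
--             outcome = [0] * (m1_count + m2_count)
--             outcome[i] = 1
--             outcome[m1_count + j] = 1
--             outcomes.append(outcome)
--     return outcomes
-- ===== SOURCE B (Python) =====
-- def _generate_independent_outcomes(
--     m1_count: int,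
--     m2_count: int,
-- ) -> list[list[int]]:
--     """Generate all valid outcomes for independent markets."""
--     if m1_count <= 0 or m2_count <= 0:
--         return []
--     outcomes = []
--     for k in range(m1_count * m2_count):
--         i, j = divmod(k, m2_count)
--         outcomes.append(
--             [0] * i + [1] + [0] * (m1_count - 1 - i + j) + [1] + [0] * (m2_count - 1 - j)
--         )
--     return outcomes
-- ===== Notes on version B (the rewrite author's own statement) =====
-- stated objective: alternative
-- what changed: B replaces A's nested i/j loops that allocate a zero vector and mutate two indices with a single flat loop over the pair index k in range(m1*m2), recovering (i, j) = divmod(k, m2) and assembling each row immutably as a concatenation of zero slabs around two literal ones.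
import Mathlib
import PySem

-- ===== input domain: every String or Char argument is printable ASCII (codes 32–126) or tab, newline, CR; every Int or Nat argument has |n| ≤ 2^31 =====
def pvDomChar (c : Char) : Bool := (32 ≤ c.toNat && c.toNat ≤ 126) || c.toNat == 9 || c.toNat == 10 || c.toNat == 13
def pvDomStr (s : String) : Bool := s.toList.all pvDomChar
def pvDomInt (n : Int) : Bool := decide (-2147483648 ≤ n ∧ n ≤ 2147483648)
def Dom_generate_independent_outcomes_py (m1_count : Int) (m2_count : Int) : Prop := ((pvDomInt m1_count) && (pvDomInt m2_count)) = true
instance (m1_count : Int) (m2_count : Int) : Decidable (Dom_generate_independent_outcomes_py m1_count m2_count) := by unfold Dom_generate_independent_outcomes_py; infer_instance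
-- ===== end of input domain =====

-- B replaces A's nested loops (allocate a zero vector, mutate two indices) with one flat loop
-- over the pair index k in range(m1*m2), decoding (i, j) = divmod(k, m2) and emitting each row
-- as a concatenation of zero slabs around two literal ones (objective: alternative decomposition).

-- ===== PORT A =====
-- outcome[i] = 1 on a well-bounded, nonnegative index i (guaranteed by the enclosing range loop)
def pvSetA (xs : List Int) (i : Int) (v : Int) : List Int := xs.set i.toNat v

def generate_independent_outcomes_py (m1_count : Int) (m2_count : Int) : List (List Int) :=
  (PySem.List.pyRange 0 m1_count).foldl (fun outcomes i =>
    (PySem.List.pyRange 0 m2_count).foldl (fun outcomes j =>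
      outcomes ++ [pvSetA (pvSetA (List.replicate (m1_count + m2_count).toNat 0) i 1)
                     (m1_count + j) 1]) outcomes) []

-- ===== PORT B =====
-- [0] * c on a loop-derived count c ≥ 0 (Python: empty for c ≤ 0, matching toNat's clamp)
def generate_independent_outcomes_py_alt (m1_count : Int) (m2_count : Int) : List (List Int) :=
  if m1_count ≤ 0 ∨ m2_count ≤ 0 then [] else
  (PySem.List.pyRange 0 (m1_count * m2_count)).foldl (fun outcomes k =>
    let i := PySem.Int.floordiv k m2_count
    let j := PySem.Int.mod k m2_count
    outcomes ++ [List.replicate i.toNat 0 ++ [1]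
      ++ List.replicate (m1_count - 1 - i + j).toNat 0 ++ [1]
      ++ List.replicate (m2_count - 1 - j).toNat 0]) []

-- ===== PRECONDITION & SPEC =====
def Spec_generate_independent_outcomes_py (m1_count : Int) (m2_count : Int) (out : List (List Int)) : Prop := out = generate_independent_outcomes_py_alt m1_count m2_count
instance (m1_count : Int) (m2_count : Int) (out : List (List Int)) : Decidable (Spec_generate_independent_outcomes_py m1_count m2_count out) := by unfold Spec_generate_independent_outcomes_py; infer_instance

-- ===== CLAIM (what is proved, stated in full; the proofs are below) =====
def Claim_equal_generate_independent_outcomes_py : Prop := ∀ (m1_count : Int) (m2_count : Int), Dom_generate_independent_outcomes_py m1_count m2_count → Spec_generate_independent_outcomes_py m1_count m2_count (generate_independent_outcomes_py m1_count m2_count)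

-- ===== LEMMAS AND PROOFS =====

-- Flattening a product range: range (a*b) mapped by g is the nested flatMap over i < a, j < b.
theorem range_mul_flat {α : Type} (g : Nat → α) : ∀ (a b : Nat),
    (List.range (a*b)).map g
      = (List.range a).flatMap (fun i => (List.range b).map (fun j => g (i*b+j))) := by
  intro a b
  induction a with
  | zero => simp
  | succ a ih =>
    rw [Nat.succ_mul, List.range_add, List.map_append, ih, List.range_succ,
      List.flatMap_append]
    simp [List.map_map, Function.comp_def]

-- Decoding the flat index: divmod (i*b+j) b = (i, j) for j < b, over Int via Nat casts.
theorem decode_floordiv (i j b : Nat) (hj : j < b) :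
    PySem.Int.floordiv ((i*b+j : Nat) : Int) ((b : Nat) : Int) = ((i : Nat) : Int) := by
  rw [PySem.Int.floordiv_natCast]
  have : (i*b+j)/b = i := by
    rw [Nat.mul_comm i b, Nat.mul_add_div (by omega), Nat.div_eq_of_lt hj, Nat.add_zero]
  rw [this]

theorem decode_mod (i j b : Nat) (_hj : j < b) :
    PySem.Int.mod ((i*b+j : Nat) : Int) ((b : Nat) : Int) = ((j : Nat) : Int) := by
  rw [PySem.Int.mod_natCast]
  have : (i*b+j) % b = j := by
    rw [Nat.mul_comm i b, Nat.mul_add_mod, Nat.mod_eq_of_lt _hj]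
  rw [this]

-- A's row (zero vector with two indices set) equals B's slab-concatenation row.
theorem row_eq (m1 m2 i j : Int) (hi0 : 0 ≤ i) (hi : i < m1) (hj0 : 0 ≤ j) (hj : j < m2) :
    pvSetA (pvSetA (List.replicate (m1 + m2).toNat 0) i 1) (m1 + j) 1
      = List.replicate i.toNat 0 ++ [1] ++ List.replicate (m1 - 1 - i + j).toNat 0
          ++ [1] ++ List.replicate (m2 - 1 - j).toNat 0 := by
  apply List.ext_getElem
  · simp [pvSetA]; omega
  · intro t h1 h2
    have ht : t < (m1 + m2).toNat := by simpa [pvSetA] using h1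
    simp only [pvSetA, List.getElem_set, List.getElem_replicate, List.getElem_append,
      List.length_append, List.length_replicate, List.length_cons, List.length_nil,
      List.getElem_singleton]
    split_ifs <;> first | rfl | omega

-- ===== VERDICT (by name: the statement is the Claim_ definition above) =====
theorem generate_independent_outcomes_py_spec : Claim_equal_generate_independent_outcomes_py := by
  intro m1 m2 _
  show _ = _
  unfold generate_independent_outcomes_py generate_independent_outcomes_py_alt
  simp only [PySem.List.foldl_append_singleton_eq_map, PySem.List.foldl_append_eq_flatMap,
    List.nil_append]
  by_cases h : m1 ≤ 0 ∨ m2 ≤ 0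
  · rw [if_pos h]
    rcases h with h | h
    · have he : PySem.List.pyRange 0 m1 = [] :=
        PySem.List.pyRange_one_eq_nil (by omega)
      simp [he]
    · have he : PySem.List.pyRange 0 m2 = [] :=
        PySem.List.pyRange_one_eq_nil (by omega)
      simp [he]
  · rw [if_neg h]
    have h1 : 0 < m1 := by omega
    have h2 : 0 < m2 := by omega
    have hm1 : ((m1.toNat : Nat) : Int) = m1 := by omega
    have hm2 : ((m2.toNat : Nat) : Int) = m2 := by omega
    have hmul : ((m1 * m2 - 0).toNat) = m1.toNat * m2.toNat := by
      have : m1 * m2 = ((m1.toNat * m2.toNat : Nat) : Int) := by push_cast; rw [hm1, hm2]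
      omega
    -- B side: flat map over range (m1*m2)
    rw [PySem.List.pyRange_one 0 (m1*m2), hmul, List.map_map]
    rw [range_mul_flat _ m1.toNat m2.toNat]
    -- A side: nested flatMap over ranges m1, m2
    rw [PySem.List.pyRange_one 0 m1, PySem.List.pyRange_one 0 m2]
    simp only [Int.sub_zero, List.flatMap_map, List.map_map, Function.comp_def, zero_add]
    apply List.flatMap_congr
    intro i hi
    apply List.map_congr_left
    intro j hj
    have hi' : i < m1.toNat := List.mem_range.mp hi
    have hj' : j < m2.toNat := List.mem_range.mp hj
    have hd : PySem.Int.floordiv ((i * m2.toNat + j : Nat) : Int) m2 = (i : Int) := by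
      rw [← hm2]; exact decode_floordiv i j m2.toNat hj'
    have hm : PySem.Int.mod ((i * m2.toNat + j : Nat) : Int) m2 = (j : Int) := by
      rw [← hm2]; exact decode_mod i j m2.toNat hj'
    rw [hd, hm]
    exact row_eq m1 m2 i j (by omega) (by omega) (by omega) (by omega)
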